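-- pv_equiv track=rewrite | github.com/Vigneswaran-Chandrasekaran/brian2tools | brian2tools/mdexport/expander.py | check_plural
-- ===== SOURCE A (Python) =====
-- def check_plural(iterable, singular_word=None,
--                  allow_constants=True):
--     """
--     Function to attach plural form of the word
--     by examining the following iterable
--
--     Parameters
--     ----------
--     iterable : object with `__iter__` attribute
--         Object that has to be examined
--
--     singular_word : str, optional
--         Word whose plural form has to searched in `singular_plural_dict`
--
--     allow_constants : bool, optional
--         Whether to assume non iterable as singular, if set as `True`,
--         the `iterable` argument must be an iterable
--     """
--     count = 0
--     # dict where adding 's' at the end won't work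
--     singular_plural_dict = {'index': 'indices',
--                             'property': 'properties'
--                         }
--     # check iterable
--     if hasattr(iterable, '__iter__'):
--         for _ in iterable:
--             count += 1
--             if count > 1:
--                 if singular_word:
--                     try:
--                         return singular_plural_dict[singular_word]
--                     except KeyError:
--                         raise Exception("The singular word is not found \
--                                          in singular-plural dictionary.")
--                 return 's'
--     # check allow constants
--     elif not allow_constants:
--         raise IndexError("Suppose to be iterable object \
--                         but instance got {}".format(type(iterable)))
--     return ''
-- ===== SOURCE B (Python) =====
-- def check_plural(iterable, singular_word=None,
--                  allow_constants=True):
--     singular_plural_dict = {'index': 'indices',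
--                             'property': 'properties'}
--     if not hasattr(iterable, '__iter__'):
--         if not allow_constants:
--             raise IndexError("Suppose to be iterable object \
--                         but instance got {}".format(type(iterable)))
--         return ''
--     # materialize the iterable and decide on its total length: no counting loop
--     if len(list(iterable)) <= 1:
--         return ''
--     if not singular_word:
--         return 's'
--     try:
--         return singular_plural_dict[singular_word]
--     except KeyError:
--         raise Exception("The singular word is not found \
--                                          in singular-plural dictionary.")
-- ===== Notes on version B (the rewrite author's own statement) =====
-- stated objective: simpler
-- what changed: A threads an accumulator through a counting loop with in-loop returns; B has no loop at all: it materializes the iterable, compares its total length against 1 once, and then does the singular/plural branching in a flat early-return chain.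
import Mathlib
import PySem

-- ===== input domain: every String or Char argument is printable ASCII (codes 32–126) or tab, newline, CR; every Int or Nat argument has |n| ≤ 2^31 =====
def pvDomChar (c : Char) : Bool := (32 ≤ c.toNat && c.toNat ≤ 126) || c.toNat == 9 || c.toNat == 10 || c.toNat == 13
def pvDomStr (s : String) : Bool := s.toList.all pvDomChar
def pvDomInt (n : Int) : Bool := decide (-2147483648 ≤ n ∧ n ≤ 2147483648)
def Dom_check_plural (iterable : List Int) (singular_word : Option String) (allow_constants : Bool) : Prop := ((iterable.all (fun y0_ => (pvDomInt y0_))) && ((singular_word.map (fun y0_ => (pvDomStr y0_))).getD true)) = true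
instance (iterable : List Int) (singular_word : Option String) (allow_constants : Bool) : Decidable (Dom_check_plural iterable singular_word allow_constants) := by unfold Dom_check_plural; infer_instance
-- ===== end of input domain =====

-- B drops A's accumulator-threaded counting loop entirely: it materializes the list, compares
-- its total length with 1 once, then branches in a flat early-return chain (simpler decomposition);
-- equivalence is over the return value only.

-- ===== PORT A =====
-- A's for-loop with the running `count` and in-loop returns; `none` means the loop
-- finished without returning (Python then falls through to `return ''`).
-- On the KeyError path Python raises (excluded by Pre_); the port returns "" there.
def check_plural_loop (xs : List Int) (count : Int) (singular_word : Option String) : Option String :=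
  match xs with
  | [] => none
  | _ :: t =>
    let count := count + 1
    if count > 1 then
      match singular_word with
      | some w =>
        if w ≠ "" then
          match (PySem.Dict.ofList [("index", "indices"), ("property", "properties")]).get? w with
          | some v => some v
          | none => some ""   -- Python raises Exception here; outside Pre_
        else some "s"
      | none => some "s"
    else check_plural_loop t count singular_word

def check_plural (iterable : List Int) (singular_word : Option String) (allow_constants : Bool) : String :=
  match check_plural_loop iterable 0 singular_word with
  | some r => r
  | none => ""

-- ===== PORT B =====
-- no loop: `len(list(iterable)) <= 1` then a flat early-return chain
def check_plural_alt (iterable : List Int) (singular_word : Option String) (allow_constants : Bool) : String :=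
  if iterable.length ≤ 1 then ""
  else if (match singular_word with | some w => w == "" | none => true : Bool) then "s"
  else
    match (PySem.Dict.ofList [("index", "indices"), ("property", "properties")]).get? (singular_word.getD "") with
    | some v => v
    | none => ""   -- Python raises Exception here; outside Pre_

-- ===== PRECONDITION & SPEC =====
-- Pre_ excludes exactly the inputs on which A raises: a list with ≥ 2 elements together
-- with a non-empty singular_word that is neither "index" nor "property" (KeyError → Exception).
def Pre_check_plural (iterable : List Int) (singular_word : Option String) (allow_constants : Bool) : Prop :=
  ¬ (2 ≤ iterable.length ∧ ∃ w, singular_word = some w ∧ w ≠ "" ∧ w ≠ "index" ∧ w ≠ "property")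
instance (iterable : List Int) (singular_word : Option String) (allow_constants : Bool) : Decidable (Pre_check_plural iterable singular_word allow_constants) := by unfold Pre_check_plural; infer_instance
def pvWitness_check_plural : List Int × Option String × Bool := ([1, 2], some "index", true)

def Spec_check_plural (iterable : List Int) (singular_word : Option String) (allow_constants : Bool) (out : String) : Prop := out = check_plural_alt iterable singular_word allow_constants
instance (iterable : List Int) (singular_word : Option String) (allow_constants : Bool) (out : String) : Decidable (Spec_check_plural iterable singular_word allow_constants out) := by unfold Spec_check_plural; infer_instance

-- ===== CLAIM =====
def Claim_equal_check_plural : Prop := ∀ (iterable : List Int) (singular_word : Option String) (allow_constants : Bool), Dom_check_plural iterable singular_word allow_constants → Pre_check_plural iterable singular_word allow_constants → Spec_check_plural iterable singular_word allow_constants (check_plural iterable singular_word allow_constants)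

-- ===== LEMMAS AND PROOFS =====

-- ===== VERDICT =====
theorem check_plural_spec : Claim_equal_check_plural := by
  intro iterable singular_word allow_constants _ hpre
  unfold Spec_check_plural check_plural check_plural_alt
  match iterable with
  | [] => simp [check_plural_loop]
  | [x] => simp [check_plural_loop]
  | x :: y :: t =>
    simp only [check_plural_loop]
    norm_num
    cases singular_word with
    | none => simp
    | some w =>
      by_cases hw : w = ""
      · simp [hw]
      · unfold Pre_check_plural at hpre
        by_cases hi : w = "index"
        · subst hi; simp [hw]; decide
        · by_cases hq : w = "property"
          · subst hq; simp [hw]; decide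
          · exact absurd ⟨by simp, w, rfl, hw, hi, hq⟩ hpre
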